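-- pv_equiv track=rewrite | github.com/NickOneRG/Python_learn | RoboContest/0005.Kopaytma.py | f
-- ===== SOURCE A (Python) =====
-- def f(Z):
--     if Z == 0: return -1
--
--     count, i, n = 0, 1, Z
--     if Z < 0: n *= -1
--
--     while i * i <= n:
--         if n % i == 0:
--             count += 2 if i * i != n else 1
--
--         i += 1
--
--     return count + 1 if count % 2 == 1 and Z > 0 else count
-- ===== SOURCE B (Python) =====
-- def f(Z):
--     if Z == 0:
--         return -1
--     n = abs(Z)
--     prod = 1
--     d = 2
--     while d * d <= n:
--         if n % d == 0:
--             e = 0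
--             while n % d == 0:
--                 n //= d
--                 e += 1
--             prod *= e + 1
--         d += 1
--     if n > 1:
--         prod *= 2
--     return prod + 1 if prod % 2 == 1 and Z > 0 else prod
-- ===== Notes on version B (the rewrite author's own statement) =====
-- stated objective: faster
-- what changed: B computes the divisor count by trial-division prime factorization (multiplying exponent+1 for each prime found up to sqrt, times 2 for a leftover prime), instead of A's scan over all candidates up to sqrt counting divisor pairs; the sign/parity post-processing is unchanged.
import Mathlib
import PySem

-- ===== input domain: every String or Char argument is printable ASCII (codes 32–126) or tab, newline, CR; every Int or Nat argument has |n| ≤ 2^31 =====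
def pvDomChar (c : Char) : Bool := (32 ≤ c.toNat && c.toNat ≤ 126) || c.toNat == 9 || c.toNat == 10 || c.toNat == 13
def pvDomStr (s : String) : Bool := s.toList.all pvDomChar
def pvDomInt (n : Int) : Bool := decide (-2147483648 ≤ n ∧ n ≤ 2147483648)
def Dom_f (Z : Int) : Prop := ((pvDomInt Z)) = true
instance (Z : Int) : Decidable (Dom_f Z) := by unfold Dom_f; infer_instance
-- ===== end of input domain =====

-- B computes the divisor count by trial-division prime factorization instead of A's
-- scan of all candidates up to sqrt; same post-processing, same return value everywhere.
-- (The `fuel : Nat` arguments only make the while-loops structurally recursive; each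
--  call supplies enough fuel that the loop always stops on its Python condition.)

-- ===== PORT A =====
-- A's while loop: i scans upward while i*i <= n, counting divisor pairs
def fLoopA (n : Int) : Nat → Int → Int → Int
  | 0, _, count => count
  | fuel + 1, i, count =>
    if i * i ≤ n then
      fLoopA n fuel (i + 1) (if PySem.Int.mod n i = 0 then count + (if i * i ≠ n then 2 else 1) else count)
    else count

def f (Z : Int) : Int :=
  if Z = 0 then -1
  else
    let n : Int := if Z < 0 then -Z else Z
    let count := fLoopA n (n.toNat + 1) 1 0
    if PySem.Int.mod count 2 = 1 ∧ 0 < Z then count + 1 else count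

-- ===== PORT B =====
-- B's inner while loop: divide factor d out of n, counting the exponent in e
def fStrip : Nat → Int → Int → Int → Int × Int
  | 0, n, _, e => (n, e)
  | fuel + 1, n, d, e =>
    if PySem.Int.mod n d = 0 then fStrip fuel (PySem.Int.floordiv n d) d (e + 1)
    else (n, e)

-- B's outer while loop: d scans upward while d*d <= n, stripping each factor found
def fLoopB : Nat → Int → Int → Int → Int × Int
  | 0, n, _, prod => (n, prod)
  | fuel + 1, n, d, prod =>
    if d * d ≤ n then
      if PySem.Int.mod n d = 0 then
        let r := fStrip n.toNat n d 0
        fLoopB fuel r.1 (d + 1) (prod * (r.2 + 1))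
      else fLoopB fuel n (d + 1) prod
    else (n, prod)

def f_alt (Z : Int) : Int :=
  if Z = 0 then -1
  else
    let n : Int := |Z|
    let r := fLoopB n.toNat n 2 1
    let prod := if 1 < r.1 then r.2 * 2 else r.2
    if PySem.Int.mod prod 2 = 1 ∧ 0 < Z then prod + 1 else prod

-- ===== PRECONDITION & SPEC =====
def Spec_f (Z : Int) (out : Int) : Prop := out = f_alt Z
instance (Z : Int) (out : Int) : Decidable (Spec_f Z out) := by unfold Spec_f; infer_instance

-- ===== CLAIM (what is proved, stated in full; the proofs are below) =====
def Claim_equal_f : Prop := ∀ (Z : Int), Dom_f Z → Spec_f Z (f Z)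

-- ===== LEMMAS AND PROOFS =====

-- the weight A's loop adds at candidate j
def wA (m j : ℕ) : ℕ := if m % j = 0 then (if j * j = m then 1 else 2) else 0

theorem loopA_inv (m : ℕ) : ∀ (fuel i : ℕ) (count : ℤ), 1 ≤ i → m.sqrt + 1 - i ≤ fuel →
    fLoopA (m : ℤ) fuel (i : ℤ) count = count + ∑ j ∈ Finset.Ico i (m.sqrt + 1), (wA m j : ℤ) := by
  intro fuel
  induction fuel with
  | zero =>
    intro i count hi hf
    rw [fLoopA, Finset.Ico_eq_empty (by omega), Finset.sum_empty, add_zero]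
  | succ fuel ih =>
    intro i count hi hf
    by_cases hle : i ≤ m.sqrt
    · have hii : ((i:ℤ)) * i ≤ (m:ℤ) := by exact_mod_cast Nat.le_sqrt.mp hle
      rw [fLoopA, if_pos hii, PySem.Int.mod_natCast]
      have hcA : (((m % i : ℕ) : ℤ) = 0) ↔ m % i = 0 := Nat.cast_eq_zero
      have hcB : ((i:ℤ) * (i:ℤ) = (m:ℤ)) ↔ i * i = m := by exact_mod_cast Iff.rfl
      have hw : (if ((m % i : ℕ) : ℤ) = 0 then count + (if (i:ℤ) * i ≠ (m:ℤ) then 2 else 1) else count)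
          = count + (wA m i : ℤ) := by
        by_cases hm0 : m % i = 0
        · rw [if_pos (hcA.mpr hm0)]
          by_cases hsq : i * i = m
          · rw [if_neg (not_not.mpr (hcB.mpr hsq))]
            simp only [wA, if_pos hm0, if_pos hsq]
            norm_num
          · rw [if_pos (fun hc => hsq (hcB.mp hc))]
            simp only [wA, if_pos hm0, if_neg hsq]
            norm_num
        · rw [if_neg (fun hc => hm0 (hcA.mp hc))]
          simp only [wA, if_neg hm0]
          norm_num
      rw [hw]
      have hcast : ((i:ℤ)) + 1 = ((i+1 : ℕ) : ℤ) := by push_cast; ring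
      rw [Finset.sum_eq_sum_Ico_succ_bot (show i < m.sqrt + 1 by omega) (fun j => (wA m j : ℤ))]
      rw [hcast, ih (i+1) (count + (wA m i : ℤ)) (by omega) (by omega)]
      ring
    · have hii : ¬ ((i:ℤ)) * i ≤ (m:ℤ) := by
        intro hcc
        exact hle (Nat.le_sqrt.mpr (by exact_mod_cast hcc))
      rw [fLoopA, if_neg hii, Finset.Ico_eq_empty (by omega), Finset.sum_empty, add_zero]

theorem sum_w (m : ℕ) (hm : 1 ≤ m) :
    ∑ j ∈ Finset.Ico 1 (m.sqrt + 1), wA m j = m.divisors.card := by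
  classical
  have hm0 : m ≠ 0 := by omega
  -- step 1: the sum is over the small divisors
  have hset : (Finset.Ico 1 (m.sqrt + 1)).filter (fun j => m % j = 0)
      = m.divisors.filter (fun j => j * j ≤ m) := by
    ext j
    simp only [Finset.mem_filter, Finset.mem_Ico, Nat.mem_divisors, Nat.lt_succ_iff]
    constructor
    · rintro ⟨⟨h1, h2⟩, h3⟩
      exact ⟨⟨Nat.dvd_of_mod_eq_zero h3, hm0⟩, Nat.le_sqrt.mp h2⟩
    · rintro ⟨⟨h1, _⟩, h2⟩
      have hj : 0 < j := Nat.pos_of_dvd_of_pos h1 (by omega)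
      exact ⟨⟨hj, Nat.le_sqrt.mpr h2⟩, Nat.eq_zero_of_dvd_of_lt h1 |> fun _ => Nat.mod_eq_zero_of_dvd h1⟩
  have h1 : ∑ j ∈ Finset.Ico 1 (m.sqrt + 1), wA m j
      = ∑ j ∈ m.divisors.filter (fun j => j * j ≤ m), (if j * j = m then 1 else 2) := by
    rw [← hset, Finset.sum_filter]
    exact Finset.sum_congr rfl (fun j _ => rfl)
  rw [h1]
  set A := m.divisors.filter (fun j => j * j < m) with hA
  set B := m.divisors.filter (fun j => j * j = m) with hB
  set C := m.divisors.filter (fun j => m < j * j) with hC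
  have hsplit : m.divisors.filter (fun j => j * j ≤ m) = A ∪ B := by
    rw [hA, hB, ← Finset.filter_or]
    exact Finset.filter_congr (fun j _ => by omega)
  have hdisj : Disjoint A B := by
    rw [Finset.disjoint_left]
    intro a haA haB
    rw [hA, Finset.mem_filter] at haA
    rw [hB, Finset.mem_filter] at haB
    omega
  have hsum : ∑ j ∈ m.divisors.filter (fun j => j * j ≤ m), (if j * j = m then 1 else 2)
      = 2 * A.card + B.card := by
    rw [hsplit, Finset.sum_union hdisj]
    have e1 : ∑ j ∈ A, (if j * j = m then 1 else 2) = 2 * A.card := by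
      rw [Finset.sum_congr rfl (fun j hj => if_neg (by
        rw [hA] at hj; simp only [Finset.mem_filter] at hj; omega))]
      simp [mul_comm]
    have e2 : ∑ j ∈ B, (if j * j = m then 1 else 2) = B.card := by
      rw [Finset.sum_congr rfl (fun j hj => if_pos (by
        rw [hB] at hj; simp only [Finset.mem_filter] at hj; exact hj.2))]
      simp
    rw [e1, e2]
  -- step 2: counting
  have hcard1 : (m.divisors.filter (fun j => j * j ≤ m)).card + C.card = m.divisors.card := by
    have heq : C = m.divisors.filter (fun j => ¬ j * j ≤ m) := by
      rw [hC]
      exact Finset.filter_congr (fun j _ => by simp only [not_le])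
    rw [heq]
    exact Finset.card_filter_add_card_filter_not (s := m.divisors) (p := fun j => j * j ≤ m)
  have hcard2 : (m.divisors.filter (fun j => j * j ≤ m)).card = A.card + B.card := by
    rw [hsplit, Finset.card_union_of_disjoint hdisj]
  -- step 3: bijection C ≃ A via j ↦ m / j
  have hbij : C.card = A.card := by
    apply Finset.card_nbij' (fun j => m / j) (fun j => m / j)
    · intro j hj
      rw [hC] at hj
      simp only [Finset.coe_filter, Set.mem_setOf_eq, Nat.mem_divisors] at hj
      obtain ⟨⟨hdvd, _⟩, hgt⟩ := hj
      have hj0 : 0 < j := Nat.pos_of_dvd_of_pos hdvd (by omega)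
      have hmul : m / j * j = m := Nat.div_mul_cancel hdvd
      have hklt : m / j < j := by
        by_contra hcon
        push Not at hcon
        nlinarith [hmul]
      have hk0 : 0 < m / j := by
        rcases Nat.eq_zero_or_pos (m / j) with h | h
        · rw [h] at hmul; omega
        · exact h
      simp only [hA, Finset.coe_filter, Set.mem_setOf_eq, Nat.mem_divisors]
      refine ⟨⟨⟨j, hmul.symm⟩, hm0⟩, ?_⟩
      nlinarith [hmul]
    · intro j hj
      rw [hA] at hj
      simp only [Finset.coe_filter, Set.mem_setOf_eq, Nat.mem_divisors] at hj
      obtain ⟨⟨hdvd, _⟩, hlt⟩ := hj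
      have hj0 : 0 < j := Nat.pos_of_dvd_of_pos hdvd (by omega)
      have hmul : m / j * j = m := Nat.div_mul_cancel hdvd
      have hklt : j < m / j := by
        by_contra hcon
        push Not at hcon
        nlinarith [hmul]
      simp only [hC, Finset.coe_filter, Set.mem_setOf_eq, Nat.mem_divisors]
      refine ⟨⟨⟨j, hmul.symm⟩, hm0⟩, ?_⟩
      nlinarith [hmul]
    · intro j hj
      rw [hC] at hj
      simp only [Finset.coe_filter, Set.mem_setOf_eq, Nat.mem_divisors] at hj
      exact Nat.div_div_self hj.1.1 hm0
    · intro j hj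
      rw [hA] at hj
      simp only [Finset.coe_filter, Set.mem_setOf_eq, Nat.mem_divisors] at hj
      exact Nat.div_div_self hj.1.1 hm0
  rw [hsum]
  omega

theorem loopA_eq (m : ℕ) (hm : 1 ≤ m) : fLoopA (m : ℤ) (((m : ℤ)).toNat + 1) 1 0 = (m.divisors.card : ℤ) := by
  have hs := Nat.sqrt_le_self m
  have h := loopA_inv m (((m : ℤ)).toNat + 1) 1 0 le_rfl (by omega)
  rw [Nat.cast_one] at h
  rw [h, ← Nat.cast_sum, sum_w m hm, zero_add]

theorem fStrip_spec (fuel : ℕ) : ∀ (m dm : ℕ) (e : ℤ), m ≤ fuel → 1 ≤ m → 2 ≤ dm →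
    ∃ (m' k : ℕ), fStrip fuel (m : ℤ) (dm : ℤ) e = ((m' : ℤ), e + (k : ℕ)) ∧
      m = dm ^ k * m' ∧ ¬ dm ∣ m' ∧ 1 ≤ m' := by
  induction fuel with
  | zero => intro m dm e h1 h2 h3; omega
  | succ fuel ih =>
    intro m dm e hf hm hdm
    by_cases hdvd : dm ∣ m
    · have hmod : PySem.Int.mod (m : ℤ) (dm : ℤ) = 0 := by
        rw [PySem.Int.mod_natCast]
        exact_mod_cast Nat.mod_eq_zero_of_dvd hdvd
      rw [fStrip, if_pos hmod]
      rw [PySem.Int.floordiv_natCast]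
      have hdiv1 : 1 ≤ m / dm := (Nat.one_le_div_iff (by omega)).mpr (Nat.le_of_dvd (by omega) hdvd)
      have hdivlt : m / dm < m := Nat.div_lt_self (by omega) (by omega)
      obtain ⟨m', k, heq, hfac, hnd, hm'⟩ := ih (m / dm) dm (e + 1) (by omega) hdiv1 hdm
      refine ⟨m', k + 1, ?_, ?_, hnd, hm'⟩
      · rw [heq, Prod.mk.injEq]
        exact ⟨rfl, by push_cast; ring⟩
      · have : m = dm * (m / dm) := (Nat.mul_div_cancel' hdvd).symm
        rw [this, hfac]
        ring
    · have hmod : ¬ PySem.Int.mod (m : ℤ) (dm : ℤ) = 0 := by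
        rw [PySem.Int.mod_natCast]
        intro hc
        exact hdvd (Nat.dvd_of_mod_eq_zero (by exact_mod_cast hc))
      rw [fStrip, if_neg hmod]
      exact ⟨m, 0, by norm_num, by norm_num, hdvd, hm⟩

theorem fLoopB_snd (fuel : ℕ) : ∀ (n d p : ℤ),
    fLoopB fuel n d p = ((fLoopB fuel n d 1).1, p * (fLoopB fuel n d 1).2) := by
  induction fuel with
  | zero =>
    intro n d p
    rw [fLoopB, fLoopB]
    simp
  | succ fuel ih =>
    intro n d p
    by_cases hg : d * d ≤ n
    · by_cases hmod : PySem.Int.mod n d = 0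
      · have hstep : ∀ q : ℤ, fLoopB (fuel + 1) n d q
            = fLoopB fuel (fStrip n.toNat n d 0).1 (d + 1) (q * ((fStrip n.toNat n d 0).2 + 1)) := by
          intro q
          rw [fLoopB, if_pos hg, if_pos hmod]
        rw [hstep p, hstep 1,
            ih _ _ (p * ((fStrip n.toNat n d 0).2 + 1)),
            ih _ _ (1 * ((fStrip n.toNat n d 0).2 + 1)), Prod.mk.injEq]
        exact ⟨rfl, by ring⟩
      · have hstep : ∀ q : ℤ, fLoopB (fuel + 1) n d q = fLoopB fuel n (d + 1) q := by
          intro q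
          rw [fLoopB, if_pos hg, if_neg hmod]
        rw [hstep p, hstep 1]
        exact ih _ _ p
    · rw [fLoopB, if_neg hg, fLoopB, if_neg hg]
      simp

theorem loopB_terminal (m dm : ℕ) (hm : 1 ≤ m) (_hdm : 2 ≤ dm) (hguard : ¬ dm * dm ≤ m)
    (hsmall : ∀ k : ℕ, 2 ≤ k → k < dm → ¬ k ∣ m) :
    (if (1 : ℤ) < ((m : ℕ) : ℤ) then (1 : ℤ) * 2 else 1) = (m.divisors.card : ℤ) := by
  rcases eq_or_lt_of_le hm with h1 | h1
  · rw [← h1]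
    norm_num [Nat.divisors_one]
  · -- m ≥ 2 : m is prime
    have hprime : m.Prime := by
      by_contra hnp
      have hp := Nat.minFac_prime (n := m) (by omega)
      have hpd := Nat.minFac_dvd m
      have hpsq := Nat.minFac_sq_le_self (n := m) (by omega) hnp
      rw [pow_two] at hpsq
      have hplt : m.minFac < dm := by
        by_contra hcon
        push Not at hcon
        have : dm * dm ≤ m.minFac * m.minFac := Nat.mul_le_mul hcon hcon
        omega
      exact hsmall m.minFac hp.two_le hplt hpd
    have hcard : m.divisors.card = 2 := by
      rw [hprime.divisors]
      rw [Finset.card_insert_of_notMem (by simp; omega), Finset.card_singleton]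
    have hlt : (1 : ℤ) < ((m : ℕ) : ℤ) := by exact_mod_cast h1
    rw [if_pos hlt, hcard]
    norm_num

theorem loopB_main (fuel : ℕ) : ∀ (m dm : ℕ), ((m : ℤ) + 1 - (dm : ℤ)).toNat ≤ fuel → 1 ≤ m → 2 ≤ dm →
    (∀ k : ℕ, 2 ≤ k → k < dm → ¬ k ∣ m) →
    (if 1 < (fLoopB fuel (m : ℤ) (dm : ℤ) 1).1 then (fLoopB fuel (m : ℤ) (dm : ℤ) 1).2 * 2
     else (fLoopB fuel (m : ℤ) (dm : ℤ) 1).2) = (m.divisors.card : ℤ) := by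
  induction fuel with
  | zero =>
    intro m dm hf hm hdm hsmall
    have hguard : ¬ dm * dm ≤ m := by
      intro hc
      have : dm ≤ dm * dm := Nat.le_mul_of_pos_left dm (by omega)
      omega
    rw [fLoopB]
    exact loopB_terminal m dm hm hdm hguard hsmall
  | succ fuel ih =>
    intro m dm hf hm hdm hsmall
    by_cases hguard : dm * dm ≤ m
    · have hdmm : dm ≤ m := le_trans (Nat.le_mul_of_pos_left dm (by omega)) hguard
      have hg : ((dm : ℤ) * dm ≤ (m : ℤ)) := by exact_mod_cast hguard
      have hcast1 : ((dm : ℤ)) + 1 = ((dm + 1 : ℕ) : ℤ) := by push_cast; ring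
      by_cases hdvd : dm ∣ m
      · -- strip the factor dm
        have hmod : PySem.Int.mod (m : ℤ) (dm : ℤ) = 0 := by
          rw [PySem.Int.mod_natCast]
          exact_mod_cast Nat.mod_eq_zero_of_dvd hdvd
        have htn : ((m : ℤ)).toNat = m := Int.toNat_natCast m
        obtain ⟨m', k, heq, hfac, hnd, hm'⟩ := fStrip_spec m m dm 0 le_rfl hm hdm
        have hk1 : 1 ≤ k := by
          rcases Nat.eq_zero_or_pos k with h | h
          · exfalso; rw [h, pow_zero, one_mul] at hfac; rw [hfac] at hdvd; exact hnd hdvd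
          · exact h
        have hmlt : m' < m := by
          have h2k : 2 ≤ dm ^ k := by
            calc 2 = 2 ^ 1 := by norm_num
            _ ≤ dm ^ k := Nat.pow_le_pow_left hdm k |> fun h => le_trans (Nat.pow_le_pow_right (by norm_num) hk1) h
          nlinarith [hfac]
        have hstep : fLoopB (fuel + 1) (m : ℤ) (dm : ℤ) 1
            = fLoopB fuel ((m' : ℕ) : ℤ) ((dm : ℤ) + 1) (1 * ((0 + (k : ℕ)) + 1)) := by
          rw [fLoopB, if_pos hg, if_pos hmod]
          show fLoopB fuel (fStrip ((m:ℤ)).toNat (m:ℤ) (dm:ℤ) 0).1 ((dm:ℤ) + 1)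
              (1 * ((fStrip ((m:ℤ)).toNat (m:ℤ) (dm:ℤ) 0).2 + 1)) = _
          rw [htn, heq]
        rw [hstep, fLoopB_snd fuel _ _ _]
        have hT := ih m' (dm + 1) (by omega) hm' (by omega) (by
          intro k' hk'2 hk'lt hk'dvd
          rcases Nat.lt_succ_iff_lt_or_eq.mp hk'lt with h | h
          · exact hsmall k' hk'2 h (hk'dvd.trans ⟨dm ^ k, by rw [hfac]; ring⟩)
          · rw [h] at hk'dvd; exact hnd hk'dvd)
        rw [← hcast1] at hT
        -- dm is prime
        have hdmp : dm.Prime := by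
          rw [Nat.prime_def_lt]
          refine ⟨hdm, fun a halt hadvd => ?_⟩
          rcases Nat.lt_or_ge a 2 with h2 | h2
          · interval_cases a
            · exfalso; have := Nat.eq_zero_of_zero_dvd hadvd; omega
            · rfl
          · exact absurd (hadvd.trans hdvd) (hsmall a h2 halt)
        have hcop : (dm ^ k).Coprime m' :=
          Nat.Coprime.pow_left k ((Nat.Prime.coprime_iff_not_dvd hdmp).mpr hnd)
        have htau : m.divisors.card = (k + 1) * m'.divisors.card := by
          conv_lhs => rw [hfac]
          rw [hcop.card_divisors_mul]
          congr 1
          rw [Nat.divisors_prime_pow hdmp k, Finset.card_map, Finset.card_range]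
        rw [htau]
        set X := (fLoopB fuel ((m' : ℕ) : ℤ) ((dm : ℤ) + 1) 1).1
        set Y := (fLoopB fuel ((m' : ℕ) : ℤ) ((dm : ℤ) + 1) 1).2
        by_cases hX : 1 < X
        · rw [if_pos hX] at hT ⊢
          rw [show (1 * ((0 + (k:ℕ)) + 1) * Y : ℤ) * 2 = ((k:ℕ) + 1) * (Y * 2) by ring, hT]
          push_cast
          ring
        · rw [if_neg hX] at hT ⊢
          rw [show (1 * ((0 + (k:ℕ)) + 1) * Y : ℤ) = ((k:ℕ) + 1) * Y by ring, hT]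
          push_cast
          ring
      · -- dm does not divide m: move on
        have hmod : ¬ PySem.Int.mod (m : ℤ) (dm : ℤ) = 0 := by
          rw [PySem.Int.mod_natCast]
          intro hc
          exact hdvd (Nat.dvd_of_mod_eq_zero (by exact_mod_cast hc))
        have hstep : fLoopB (fuel + 1) (m : ℤ) (dm : ℤ) 1 = fLoopB fuel (m : ℤ) ((dm : ℤ) + 1) 1 := by
          rw [fLoopB, if_pos hg, if_neg hmod]
        rw [hstep, hcast1]
        exact ih m (dm + 1) (by omega) hm (by omega) (by
          intro k' hk'2 hk'lt hk'dvd
          rcases Nat.lt_succ_iff_lt_or_eq.mp hk'lt with h | h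
          · exact hsmall k' hk'2 h hk'dvd
          · rw [h] at hk'dvd; exact hdvd hk'dvd)
    · have hg : ¬ ((dm : ℤ) * dm ≤ (m : ℤ)) := fun hc => hguard (by exact_mod_cast hc)
      rw [fLoopB, if_neg hg]
      exact loopB_terminal m dm hm hdm hguard hsmall

-- ===== VERDICT (by name: the statement is the Claim_ definition above) =====
theorem f_spec : Claim_equal_f := by
  intro Z _
  unfold Spec_f
  by_cases hZ : Z = 0
  · simp [f, f_alt, hZ]
  · have hm1 : 1 ≤ Z.natAbs := by omega
    have habs : (if Z < 0 then -Z else Z) = ((Z.natAbs : ℤ)) := by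
      split <;> omega
    have habs2 : |Z| = ((Z.natAbs : ℤ)) := by exact_mod_cast Int.abs_eq_natAbs Z
    have hA : fLoopA ((Z.natAbs : ℤ)) (((Z.natAbs : ℤ)).toNat + 1) 1 0
        = (Z.natAbs.divisors.card : ℤ) := loopA_eq _ hm1
    have hB := loopB_main (((Z.natAbs : ℤ)).toNat) Z.natAbs 2 (by omega) hm1 le_rfl
      (by intro k hk hk2 _; omega)
    simp only [f, f_alt, if_neg hZ, habs, habs2]
    rw [hA]
    rw [show ((2:ℕ) : ℤ) = (2 : ℤ) by norm_num] at hB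
    rw [hB]
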